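-- pv_equiv track=rewrite | github.com/eldala07/advent-of-code-2024 | day05.py | is_invalid_order_line
-- ===== SOURCE A (Python) =====
-- def is_invalid_order_line(rules_lines, orders_line):
--     is_invalid = False
--     for rules in rules_lines:
--         try:
--             if orders_line.index(rules[0]) > orders_line.index(rules[1]):
--                 is_invalid = True
--                 break
--         except ValueError:
--             pass  # do nothing!
--
--     return is_invalid
-- ===== SOURCE B (Python) =====
-- def is_invalid_order_line(rules_lines, orders_line):
--     succ = {}
--     for rule in rules_lines:
--         succ.setdefault(rule[0], set()).add(rule[1])
--     seen = set()
--     for x in orders_line: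
--         if x in seen:
--             continue
--         if not seen.isdisjoint(succ.get(x, ())):
--             return True
--         seen.add(x)
--     return False
-- ===== Notes on version B (the rewrite author's own statement) =====
-- stated objective: faster
-- what changed: Replaces the per-rule pair of linear .index scans over orders_line with a prebuilt successor dictionary and a single left-to-right pass over orders_line maintaining a 'seen' set.
-- outside the precondition, e.g. on is_invalid_order_line([[1, 2], [3]], [2, 1]): A returns True, B raises IndexError
import Mathlib
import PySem

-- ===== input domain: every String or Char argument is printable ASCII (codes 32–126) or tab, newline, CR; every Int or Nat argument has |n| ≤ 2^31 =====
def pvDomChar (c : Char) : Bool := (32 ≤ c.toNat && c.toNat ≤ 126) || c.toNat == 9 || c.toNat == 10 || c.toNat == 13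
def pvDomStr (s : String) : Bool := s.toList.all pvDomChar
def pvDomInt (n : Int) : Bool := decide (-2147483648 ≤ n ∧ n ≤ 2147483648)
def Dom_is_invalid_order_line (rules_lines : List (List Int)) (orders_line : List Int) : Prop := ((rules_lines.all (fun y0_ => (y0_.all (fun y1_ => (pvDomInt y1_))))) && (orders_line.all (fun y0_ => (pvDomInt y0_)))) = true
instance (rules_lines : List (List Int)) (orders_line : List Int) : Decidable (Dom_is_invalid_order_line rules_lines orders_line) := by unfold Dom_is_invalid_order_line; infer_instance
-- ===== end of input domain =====

-- B replaces A's per-rule pair of .index scans by a prebuilt successor dictionary and one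
-- left-to-right pass over orders_line with a 'seen' set (objective: faster).

-- ===== PORT A =====
-- the for-loop with break; the try/except ValueError corresponds to the 'none' cases of index?
-- Python evaluates orders_line.index(rules[0]) BEFORE rules[1]; a ValueError there skips the rule
-- without ever reading rules[1].
def pvALoop (orders_line : List Int) : List (List Int) → Bool
  | [] => false
  | rules :: rest =>
    match PySem.List.pyGet? rules 0 with
    | none => false   -- rules[0] IndexError is NOT caught by A: excluded by Pre_
    | some a =>
      match PySem.List.index? orders_line a with
      | none => pvALoop orders_line rest       -- ValueError: pass
      | some i =>
        match PySem.List.pyGet? rules 1 with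
        | none => false   -- rules[1] IndexError is NOT caught by A: excluded by Pre_
        | some b =>
          match PySem.List.index? orders_line b with
          | none => pvALoop orders_line rest   -- ValueError: pass
          | some j => if i > j then true else pvALoop orders_line rest

def is_invalid_order_line (rules_lines : List (List Int)) (orders_line : List Int) : Bool :=
  pvALoop orders_line rules_lines

-- ===== PORT B =====
-- succ.setdefault(rule[0], set()).add(rule[1]): the value at rule[0] becomes (old-or-empty).add(rule[1]);
-- only lookups are done afterwards, so Dict.insert models it exactly. A rule shorter than 2 raises
-- IndexError in Source B too: excluded by Pre_ (the '_ => d' branch is junk outside Pre_).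
def pvBSucc : List (List Int) → PySem.Dict Int (PySem.Set Int) → PySem.Dict Int (PySem.Set Int)
  | [], d => d
  | rule :: rest, d =>
    match rule with
    | a :: b :: _ => pvBSucc rest (d.insert a (PySem.Set.add (d.getD a PySem.Set.empty) b))
    | _ => d

def pvBLoop (d : PySem.Dict Int (PySem.Set Int)) : List Int → PySem.Set Int → Bool
  | [], _ => false
  | x :: rest, seen =>
    if PySem.Set.contains seen x then pvBLoop d rest seen
    else if !(PySem.Set.isdisjoint seen (d.getD x PySem.Set.empty)) then true
    else pvBLoop d rest (PySem.Set.add seen x)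

def is_invalid_order_line_alt (rules_lines : List (List Int)) (orders_line : List Int) : Bool :=
  pvBLoop (pvBSucc rules_lines PySem.Dict.empty) orders_line PySem.Set.empty

-- ===== PRECONDITION & SPEC =====
-- A raises an uncaught IndexError on a rule line with fewer than 2 entries (and Source B does too);
-- Pre_ excludes every input containing such a rule line, even the ones where A happens to break
-- (return True) before reaching it — see the cite in claim.json.
def Pre_is_invalid_order_line (rules_lines : List (List Int)) (orders_line : List Int) : Prop :=
  ∀ r ∈ rules_lines, 2 ≤ r.length
instance (rules_lines : List (List Int)) (orders_line : List Int) : Decidable (Pre_is_invalid_order_line rules_lines orders_line) := by unfold Pre_is_invalid_order_line; infer_instance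

def pvWitness_is_invalid_order_line : List (List Int) × List Int := ([[1, 2], [2, 3]], [1, 3, 2])

def Spec_is_invalid_order_line (rules_lines : List (List Int)) (orders_line : List Int) (out : Bool) : Prop := out = is_invalid_order_line_alt rules_lines orders_line
instance (rules_lines : List (List Int)) (orders_line : List Int) (out : Bool) : Decidable (Spec_is_invalid_order_line rules_lines orders_line out) := by unfold Spec_is_invalid_order_line; infer_instance

-- ===== CLAIM (what is proved, stated in full; the proofs are below) =====
def Claim_equal_is_invalid_order_line : Prop := ∀ (rules_lines : List (List Int)) (orders_line : List Int), Dom_is_invalid_order_line rules_lines orders_line → Pre_is_invalid_order_line rules_lines orders_line → Spec_is_invalid_order_line rules_lines orders_line (is_invalid_order_line rules_lines orders_line)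

-- ===== LEMMAS AND PROOFS =====

-- 'rule (a,b) is violated in ol': a's first occurrence is strictly after b's
def pvViol (ol : List Int) (a b : Int) : Prop :=
  ∃ i j, PySem.List.index? ol a = some i ∧ PySem.List.index? ol b = some j ∧ j < i

lemma pvALoop_iff (ol : List Int) :
    ∀ rls : List (List Int), (∀ r ∈ rls, 2 ≤ r.length) →
    (pvALoop ol rls = true ↔ ∃ a b t, (a :: b :: t) ∈ rls ∧ pvViol ol a b) := by
  intro rls
  induction rls with
  | nil => intro _; simp [pvALoop]
  | cons r rest ih =>
    intro h
    have hr : 2 ≤ r.length := h r (by simp)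
    obtain ⟨a, b, t, rfl⟩ : ∃ a b t, r = a :: b :: t := by
      match r, hr with
      | a :: b :: t, _ => exact ⟨a, b, t, rfl⟩
    have ih' := ih (fun r hrm => h r (by simp [hrm]))
    have hnn : (0 : Int) ≤ (t.length : Int) + 1 := by positivity
    have hget0 : PySem.List.pyGet? (a :: b :: t) (0 : Int) = some a := by
      simp [PySem.List.pyGet?, PySem.List.pyIdx?, hnn]
    have hget1 : PySem.List.pyGet? (a :: b :: t) (1 : Int) = some b := by
      simp [PySem.List.pyGet?, PySem.List.pyIdx?]
    have hskip : ∀ (hcase : pvViol ol a b → False),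
        ((∃ a' b' t', (a' :: b' :: t') ∈ rest ∧ pvViol ol a' b') ↔
         ∃ a' b' t', (a' :: b' :: t') ∈ (a :: b :: t) :: rest ∧ pvViol ol a' b') := by
      intro hcase
      constructor
      · rintro ⟨a', b', t', hm, hv⟩; exact ⟨a', b', t', by simp [hm], hv⟩
      · rintro ⟨a', b', t', hm, hv⟩
        rcases List.mem_cons.mp hm with heq | hm'
        · obtain ⟨rfl, rfl, rfl⟩ : a' = a ∧ b' = b ∧ t' = t := by
            injection heq with h1 h2; injection h2 with h2 h3; exact ⟨h1, h2, h3⟩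
          exact absurd hv hcase
        · exact ⟨a', b', t', hm', hv⟩
    rcases hia : PySem.List.index? ol a with _ | i <;>
      rcases hib : PySem.List.index? ol b with _ | j
    · simp only [pvALoop, hget0, hia]
      rw [ih']
      exact hskip (by rintro ⟨i, j, hi, _, _⟩; rw [hia] at hi; cases hi)
    · simp only [pvALoop, hget0, hia]
      rw [ih']
      exact hskip (by rintro ⟨i, j, hi, _, _⟩; rw [hia] at hi; cases hi)
    · simp only [pvALoop, hget0, hget1, hia, hib]
      rw [ih']
      exact hskip (by rintro ⟨i, j, _, hj, _⟩; rw [hib] at hj; cases hj)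
    · simp only [pvALoop, hget0, hget1, hia, hib]
      by_cases hij : i > j
      · rw [if_pos hij]
        exact iff_of_true rfl ⟨a, b, t, by simp, i, j, hia, hib, hij⟩
      · rw [if_neg hij]
        rw [ih']
        refine hskip ?_
        rintro ⟨i', j', hi, hj, hlt⟩
        rw [hia] at hi; rw [hib] at hj
        cases hi; cases hj; omega

lemma pvBSucc_mem (x b : Int) :
    ∀ (rls : List (List Int)) (d : PySem.Dict Int (PySem.Set Int)), (∀ r ∈ rls, 2 ≤ r.length) →
    (b ∈ (pvBSucc rls d).getD x PySem.Set.empty ↔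
      b ∈ d.getD x PySem.Set.empty ∨ ∃ t, (x :: b :: t) ∈ rls) := by
  intro rls
  induction rls with
  | nil => intro d _; simp [pvBSucc]
  | cons r rest ih =>
    intro d h
    have hr : 2 ≤ r.length := h r (by simp)
    obtain ⟨a, c, t, rfl⟩ : ∃ a c t, r = a :: c :: t := by
      match r, hr with
      | a :: c :: t, _ => exact ⟨a, c, t, rfl⟩
    have ih' := ih (d.insert a (PySem.Set.add (d.getD a PySem.Set.empty) c))
      (fun r hrm => h r (by simp [hrm]))
    simp only [pvBSucc]
    rw [ih']
    by_cases hxa : x = a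
    · subst hxa
      rw [PySem.Dict.getD_insert_self d x ((d.getD x PySem.Set.empty).add c) PySem.Set.empty, PySem.Set.mem_add]
      constructor
      · rintro (⟨hb | rfl⟩ | ⟨t', ht'⟩)
        · exact Or.inl hb
        · exact Or.inr ⟨t, by simp⟩
        · exact Or.inr ⟨t', by simp [ht']⟩
      · rintro (hb | ⟨t', ht'⟩)
        · exact Or.inl (Or.inl hb)
        · rcases List.mem_cons.mp ht' with heq | hm'
          · obtain ⟨rfl, rfl⟩ : c = b ∧ t = t' := by
              injection heq with h1 h2; injection h2 with h2 h3; exact ⟨h2.symm, h3.symm⟩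
            exact Or.inl (Or.inr rfl)
          · exact Or.inr ⟨t', hm'⟩
    · rw [PySem.Dict.getD_insert_of_ne d _ _ hxa]
      constructor
      · rintro (hb | ⟨t', ht'⟩)
        · exact Or.inl hb
        · exact Or.inr ⟨t', by simp [ht']⟩
      · rintro (hb | ⟨t', ht'⟩)
        · exact Or.inl hb
        · rcases List.mem_cons.mp ht' with heq | hm'
          · exact absurd (List.cons_eq_cons.mp heq).1 hxa
          · exact Or.inr ⟨t', hm'⟩

lemma pvBLoop_iff (d : PySem.Dict Int (PySem.Set Int)) :
    ∀ (rest : List Int) (S : PySem.Set Int), S.Nodup →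
    (pvBLoop d rest S = true ↔
      ∃ u x v, rest = u ++ x :: v ∧ x ∉ S ∧ x ∉ u ∧
        ∃ b, b ∈ d.getD x PySem.Set.empty ∧ (b ∈ S ∨ b ∈ u)) := by
  intro rest
  induction rest with
  | nil =>
    intro S _
    simp [pvBLoop]
  | cons x0 rest ih =>
    intro S hS
    by_cases hx0 : x0 ∈ S
    · have hc : PySem.Set.contains S x0 = true := (PySem.Set.contains_iff S x0).mpr hx0
      simp only [pvBLoop, hc, if_true]  -- contains S x0 = true
      rw [ih S hS]
      constructor
      · rintro ⟨u, x, v, rfl, hxS, hxu, bb, hbm, hbw⟩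
        exact ⟨x0 :: u, x, v, rfl, hxS,
          by simp only [List.mem_cons]; rintro (rfl | h); exact hxS hx0; exact hxu h,
          bb, hbm, by rcases hbw with h | h; exact Or.inl h; exact Or.inr (by simp [h])⟩
      · rintro ⟨u, x, v, hrest, hxS, hxu, bb, hbm, hbw⟩
        rcases u with _ | ⟨u0, u'⟩
        · exfalso
          injection hrest with h1 _
          exact hxS (h1 ▸ hx0)
        · injection hrest with h1 h2
          subst h1; subst h2
          refine ⟨u', x, v, rfl, hxS, fun h => hxu (by simp [h]), bb, hbm, ?_⟩
          rcases hbw with h | h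
          · exact Or.inl h
          · rcases List.mem_cons.mp h with rfl | h'
            · exact Or.inl hx0
            · exact Or.inr h'
    · have hc : PySem.Set.contains S x0 = false := by
        rw [← Bool.not_eq_true, PySem.Set.contains_iff]; exact hx0
      by_cases hdisj : ∃ bb, bb ∈ S ∧ bb ∈ d.getD x0 PySem.Set.empty
      · have hd : PySem.Set.isdisjoint S (d.getD x0 PySem.Set.empty) = false := by
          rw [← Bool.not_eq_true, PySem.Set.isdisjoint_iff]
          rcases hdisj with ⟨bb, h1, h2⟩
          exact fun hall => hall bb h1 h2
        simp only [pvBLoop, hc, hd, Bool.false_eq_true, Bool.not_false, if_true, if_false, true_iff]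
        rcases hdisj with ⟨bb, h1, h2⟩
        exact ⟨[], x0, rest, rfl, hx0, by simp, bb, h2, Or.inl h1⟩
      · have hd : PySem.Set.isdisjoint S (d.getD x0 PySem.Set.empty) = true := by
          rw [PySem.Set.isdisjoint_iff]
          intro y hy hym
          exact hdisj ⟨y, hy, hym⟩
        simp only [pvBLoop, hc, hd, Bool.false_eq_true, Bool.not_true, if_false]
        rw [ih (PySem.Set.add S x0) (PySem.Set.nodup_add S x0 hS)]
        constructor
        · rintro ⟨u, x, v, rfl, hxS, hxu, bb, hbm, hbw⟩
          have hxS' : x ∉ S := fun h => hxS ((PySem.Set.mem_add S x0 x).mpr (Or.inl h))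
          have hxx0 : x ≠ x0 := fun h => hxS ((PySem.Set.mem_add S x0 x).mpr (Or.inr h))
          refine ⟨x0 :: u, x, v, rfl, hxS',
            by simp only [List.mem_cons]; rintro (rfl | h); exact hxx0 rfl; exact hxu h,
            bb, hbm, ?_⟩
          rcases hbw with h | h
          · rcases (PySem.Set.mem_add S x0 bb).mp h with h' | rfl
            · exact Or.inl h'
            · exact Or.inr (by simp)
          · exact Or.inr (by simp [h])
        · rintro ⟨u, x, v, hrest, hxS, hxu, bb, hbm, hbw⟩
          rcases u with _ | ⟨u0, u'⟩
          · exfalso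
            injection hrest with h1 h2
            subst h1; subst h2
            rcases hbw with h | h
            · exact hdisj ⟨bb, h, hbm⟩
            · simp at h
          · injection hrest with h1 h2
            obtain rfl := h1.symm
            subst h2
            have hxu0 : x ≠ u0 := fun h => hxu (by simp [h])
            have hxS2 : x ∉ PySem.Set.add S u0 := by
              intro hmem
              rcases (PySem.Set.mem_add S u0 x).mp hmem with h' | h'
              · exact hxS h'
              · exact hxu0 h'
            refine ⟨u', x, v, rfl, hxS2, fun h => hxu (by simp [h]), bb, hbm, ?_⟩
            rcases hbw with h | h
            · exact Or.inl ((PySem.Set.mem_add S u0 bb).mpr (Or.inl h))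
            · rcases List.mem_cons.mp h with h2 | h2
              · exact Or.inl ((PySem.Set.mem_add S u0 bb).mpr (Or.inr h2))
              · exact Or.inr h2

-- the split form of the B-side condition is exactly pvViol
lemma split_iff_viol (ol : List Int) (x bb : Int) :
    (∃ u v, ol = u ++ x :: v ∧ x ∉ u ∧ bb ∈ u) ↔ pvViol ol x bb := by
  constructor
  · rintro ⟨u, v, rfl, hxu, hbu⟩
    have hix : PySem.List.index? (u ++ x :: v) x = some u.length := by
      rw [PySem.List.index?_eq_some_iff]
      exact ⟨u, v, rfl, rfl, hxu⟩
    have hib : PySem.List.index? (u ++ x :: v) bb = PySem.List.index? u bb :=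
      PySem.List.index?_append_of_mem (x :: v) hbu
    have : (PySem.List.index? u bb).isSome := (PySem.List.index?_isSome_iff u bb).mpr hbu
    rcases hj : PySem.List.index? u bb with _ | j
    · rw [hj] at this; simp at this
    · have hjlt : j < u.length := by
        rcases (PySem.List.index?_eq_some_iff u bb j).mp hj with ⟨pre, suf, hpre, hlen, _⟩
        subst hpre; simp [← hlen]
      exact ⟨u.length, j, hix, by rw [hib, hj], hjlt⟩
  · rintro ⟨i, j, hi, hj, hlt⟩
    rcases (PySem.List.index?_eq_some_iff ol x i).mp hi with ⟨pre, suf, rfl, hlen, hxpre⟩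
    refine ⟨pre, suf, rfl, hxpre, ?_⟩
    obtain ⟨hk, hget, _⟩ := PySem.List.getElem_of_index?_eq_some hj
    have hjp : j < pre.length := by omega
    have : (pre ++ x :: suf)[j] = pre[j] := List.getElem_append_left hjp
    rw [this] at hget
    exact hget ▸ List.getElem_mem hjp

-- ===== VERDICT (by name: the statement is the Claim_ definition above) =====
theorem is_invalid_order_line_spec : Claim_equal_is_invalid_order_line := by
  intro rls ol _ hpre
  unfold Spec_is_invalid_order_line is_invalid_order_line is_invalid_order_line_alt
  rw [Bool.eq_iff_iff]
  rw [pvALoop_iff ol rls hpre]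
  rw [pvBLoop_iff (pvBSucc rls PySem.Dict.empty) ol PySem.Set.empty List.nodup_nil]
  constructor
  · rintro ⟨a, b, t, hm, hv⟩
    rcases (split_iff_viol ol a b).mpr hv with ⟨u, v, rfl, hxu, hbu⟩
    refine ⟨u, a, v, rfl, by simp [PySem.Set.empty], hxu, b, ?_, Or.inr hbu⟩
    rw [pvBSucc_mem a b rls PySem.Dict.empty hpre]
    exact Or.inr ⟨t, hm⟩
  · rintro ⟨u, x, v, rfl, _, hxu, b, hbm, hbw⟩
    rw [pvBSucc_mem x b rls PySem.Dict.empty hpre] at hbm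
    rcases hbm with hb0 | ⟨t, ht⟩
    · simp [PySem.Dict.getD_empty, PySem.Set.empty] at hb0
    · have hbu : b ∈ u := by
        rcases hbw with h | h
        · simp [PySem.Set.empty] at h
        · exact h
      exact ⟨x, b, t, ht, (split_iff_viol _ x b).mp ⟨u, v, rfl, hxu, hbu⟩⟩
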